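-- pv_equiv track=rewrite | github.com/frezendesp/Sorteio | lotofacil.py | consecutive_empties_ok
-- ===== SOURCE A (Python) =====
-- def consecutive_empties_ok(game: tuple[int, ...], max_empty: int) -> bool:
--     selected = set(game)
--     for row in range(5):
--         line = [row * 5 + c + 1 for c in range(5)]
--         if max_run_empty(line, selected) > max_empty:
--             return False
--     for col in range(5):
--         line = [r * 5 + col + 1 for r in range(5)]
--         if max_run_empty(line, selected) > max_empty:
--             return False
--     return True
--
-- def max_run_empty(line: list[int], selected: set[int]) -> int:
--     run = 0
--     best = 0
--     for n in line:
--         if n in selected: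
--             run = 0
--         else:
--             run += 1
--             best = max(best, run)
--     return best
-- ===== SOURCE B (Python) =====
-- def consecutive_empties_ok(game, max_empty):
--     selected = set(game)
--     lines = [[r * 5 + c + 1 for c in range(5)] for r in range(5)]
--     lines += [[r * 5 + c + 1 for r in range(5)] for c in range(5)]
--     return all(
--         max(len(seg) for seg in
--             ''.join('1' if n in selected else '0' for n in line).split('1')) <= max_empty
--         for line in lines)
-- ===== Notes on version B (the rewrite author's own statement) =====
-- stated objective: idiomatic
-- what changed: Replaces the explicit run/best counter over each row and column with building a per-line '0'/'1' flag string, splitting it on '1', and comparing the maximum segment length against max_empty, folded into a single all(...) over the ten lines.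
import Mathlib
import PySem

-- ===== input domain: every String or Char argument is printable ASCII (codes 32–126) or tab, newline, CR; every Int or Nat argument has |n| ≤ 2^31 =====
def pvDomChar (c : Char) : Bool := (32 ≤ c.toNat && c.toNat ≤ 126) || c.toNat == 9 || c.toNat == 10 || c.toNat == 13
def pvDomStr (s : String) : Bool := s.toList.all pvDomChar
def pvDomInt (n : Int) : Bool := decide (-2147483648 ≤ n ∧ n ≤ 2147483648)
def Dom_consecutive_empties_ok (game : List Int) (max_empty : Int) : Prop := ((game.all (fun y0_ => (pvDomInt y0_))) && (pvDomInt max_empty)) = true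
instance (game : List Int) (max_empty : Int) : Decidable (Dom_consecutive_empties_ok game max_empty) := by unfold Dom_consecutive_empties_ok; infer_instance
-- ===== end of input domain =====

-- B replaces A's explicit run/best counter with a per-line flag string split on '1',
-- taking the max segment length (objective: idiomatic; same cost).

-- ===== PORT A =====
def pvMaxRunEmpty (line : List Int) (selected : PySem.Set Int) : Int :=
  -- run = 0; best = 0; for n in line: if n in selected: run = 0 else run += 1; best = max(best, run)
  (line.foldl (fun (rb : Int × Int) n =>
    if PySem.Set.contains selected n then (0, rb.2)
    else (rb.1 + 1, max rb.2 (rb.1 + 1))) (0, 0)).2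

def consecutive_empties_ok (game : List Int) (max_empty : Int) : Bool :=
  let selected := PySem.Set.ofList game
  -- for row in range(5): … return False  → all; second loop runs only if the first passed (&&)
  ((PySem.List.pyRange 0 5 1).all (fun row =>
      let line := (PySem.List.pyRange 0 5 1).map (fun c => row * 5 + c + 1)
      !(decide (pvMaxRunEmpty line selected > max_empty)))) &&
  ((PySem.List.pyRange 0 5 1).all (fun col =>
      let line := (PySem.List.pyRange 0 5 1).map (fun r => r * 5 + col + 1)
      !(decide (pvMaxRunEmpty line selected > max_empty))))

-- ===== PORT B =====
def pvSegMax (flags : List Char) : Int :=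
  -- max(len(seg) for seg in flags.split('1')); split never yields [], the [] arm is unreachable
  match (PySem.Chars.splitOn flags ['1']).map (fun seg => PySem.Chars.len seg) with
  | [] => 0
  | x :: t => t.foldl max x

def consecutive_empties_ok_alt (game : List Int) (max_empty : Int) : Bool :=
  let selected := PySem.Set.ofList game
  let lines := ((PySem.List.pyRange 0 5 1).map (fun r => (PySem.List.pyRange 0 5 1).map (fun c => r * 5 + c + 1)))
            ++ ((PySem.List.pyRange 0 5 1).map (fun c => (PySem.List.pyRange 0 5 1).map (fun r => r * 5 + c + 1)))
  lines.all (fun line =>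
    decide ((pvSegMax (line.map (fun n => if PySem.Set.contains selected n then '1' else '0'))) ≤ max_empty))

-- ===== PRECONDITION & SPEC =====
def Spec_consecutive_empties_ok (game : List Int) (max_empty : Int) (out : Bool) : Prop := out = consecutive_empties_ok_alt game max_empty
instance (game : List Int) (max_empty : Int) (out : Bool) : Decidable (Spec_consecutive_empties_ok game max_empty out) := by unfold Spec_consecutive_empties_ok; infer_instance

-- ===== CLAIM (what is proved, stated in full; the proofs are below) =====
def Claim_equal_consecutive_empties_ok : Prop := ∀ (game : List Int) (max_empty : Int), Dom_consecutive_empties_ok game max_empty → Spec_consecutive_empties_ok game max_empty (consecutive_empties_ok game max_empty)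

-- ===== LEMMAS AND PROOFS =====

-- on any 5-element line the run counter and the split-segment maximum agree
theorem pvRunEqSeg (s : PySem.Set Int) (a b c d e : Int) :
    pvMaxRunEmpty [a, b, c, d, e] s =
    pvSegMax ([a, b, c, d, e].map (fun n => if PySem.Set.contains s n then '1' else '0')) := by
  by_cases h1 : a ∈ s <;> by_cases h2 : b ∈ s <;> by_cases h3 : c ∈ s <;>
    by_cases h4 : d ∈ s <;> by_cases h5 : e ∈ s <;>
    simp [pvMaxRunEmpty, pvSegMax, h1, h2, h3, h4, h5] <;> decide

theorem pvLineEq (s : PySem.Set Int) (a b c d e m : Int) :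
    (!(decide (pvMaxRunEmpty [a, b, c, d, e] s > m))) =
    decide ((pvSegMax ([a, b, c, d, e].map (fun n => if PySem.Set.contains s n then '1' else '0'))) ≤ m) := by
  rw [pvRunEqSeg]
  simp [← decide_not]

-- ===== VERDICT (by name: the statement is the Claim_ definition above) =====
theorem consecutive_empties_ok_spec : Claim_equal_consecutive_empties_ok := by
  intro game max_empty _
  unfold Spec_consecutive_empties_ok consecutive_empties_ok consecutive_empties_ok_alt
  have hr : PySem.List.pyRange 0 5 1 = [0, 1, 2, 3, 4] := by decide
  simp only [hr, List.map, List.all, List.all_cons,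
    List.cons_append, List.nil_append]
  simp only [pvLineEq]
  simp [Bool.and_assoc]
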